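-- pv_equiv track=rewrite | github.com/mbarnes-code/expert-dollop | apps/tcg/spellbook/commander_map/domain/services/companion_service.py | _check_umori
-- ===== SOURCE A (Python) =====
-- from typing import Any, Dict, List, Optional, TYPE_CHECKING
--
-- def _check_umori(card_list: List[str], magic_cards: Dict) -> bool:
--     """Check if all nonland permanents share a type."""
--     nonlands = [
--         c for c in card_list
--         if 'Land' not in magic_cards.get(c, {}).get('type_line', '')
--     ]
--
--     possible_types = [
--         'Artifact', 'Creature', 'Land', 'Enchantment',
--         'Planeswalker', 'Instant', 'Sorcery'
--     ]
--
--     shared_types = possible_types.copy()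
--     for cardname in nonlands:
--         card_info = magic_cards.get(cardname, {})
--         type_line = card_info.get('type_line', '')
--         shared_types = [t for t in shared_types if t in type_line]
--         if not shared_types:
--             return False
--
--     return True
-- ===== SOURCE B (Python) =====
-- def _check_umori(card_list, magic_cards):
--     """Check if all nonland permanents share a type."""
--     type_lines = [
--         magic_cards.get(c, {}).get('type_line', '')
--         for c in card_list
--         if 'Land' not in magic_cards.get(c, {}).get('type_line', '')
--     ]
--     possible_types = [
--         'Artifact', 'Creature', 'Land', 'Enchantment',
--         'Planeswalker', 'Instant', 'Sorcery'
--     ]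
--     return any(all(t in tl for tl in type_lines) for t in possible_types)
-- ===== Notes on version B (the rewrite author's own statement) =====
-- stated objective: idiomatic
-- what changed: Swapped the loop nesting: instead of shrinking a candidate-type list card by card with an early return, B collects the nonland type_lines once and asks directly whether any of the 7 types occurs in all of them via any/all.
import Mathlib
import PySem

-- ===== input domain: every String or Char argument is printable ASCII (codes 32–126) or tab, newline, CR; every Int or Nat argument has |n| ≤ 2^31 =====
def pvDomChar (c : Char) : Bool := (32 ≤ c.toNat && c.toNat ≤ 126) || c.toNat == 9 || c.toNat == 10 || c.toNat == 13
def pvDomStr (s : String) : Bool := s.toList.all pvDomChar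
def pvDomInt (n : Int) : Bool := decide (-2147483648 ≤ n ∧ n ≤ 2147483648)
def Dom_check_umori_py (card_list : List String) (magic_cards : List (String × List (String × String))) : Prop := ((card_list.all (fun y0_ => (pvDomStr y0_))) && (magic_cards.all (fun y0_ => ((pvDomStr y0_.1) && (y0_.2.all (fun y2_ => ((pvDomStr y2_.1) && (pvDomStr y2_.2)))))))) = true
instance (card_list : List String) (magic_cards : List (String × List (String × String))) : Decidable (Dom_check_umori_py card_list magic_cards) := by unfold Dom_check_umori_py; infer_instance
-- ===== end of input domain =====

-- B swaps the loop nesting: instead of shrinking a candidate-type list card by card with an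
-- early return, it collects the nonland type_lines once and asks directly whether any of the
-- seven types occurs in all of them (objective: idiomatic; same cost).

-- ===== PORT A =====
-- magic_cards.get(c, {}).get('type_line', '')
def umoriTypeLine (magic_cards : List (String × List (String × String))) (c : String) : String :=
  PySem.Dict.getD (PySem.Dict.mk (PySem.Dict.getD (PySem.Dict.mk magic_cards) c [])) "type_line" ""

def umoriPossibleTypes : List String :=
  ["Artifact", "Creature", "Land", "Enchantment", "Planeswalker", "Instant", "Sorcery"]

-- the 'for cardname in nonlands' loop with its early 'return False'
def umoriLoop (magic_cards : List (String × List (String × String))) :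
    List String → List String → Bool
  | [], _ => true
  | cardname :: rest, shared_types =>
    let type_line := umoriTypeLine magic_cards cardname
    let shared_types' := shared_types.filter (fun t => PySem.Str.isIn t type_line)
    if shared_types' = [] then false else umoriLoop magic_cards rest shared_types'

def check_umori_py (card_list : List String) (magic_cards : List (String × List (String × String))) : Bool :=
  let nonlands := card_list.filter (fun c => !(PySem.Str.isIn "Land" (umoriTypeLine magic_cards c)))
  umoriLoop magic_cards nonlands umoriPossibleTypes

-- ===== PORT B =====
def check_umori_py_alt (card_list : List String) (magic_cards : List (String × List (String × String))) : Bool :=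
  let type_lines :=
    (card_list.filter (fun c => !(PySem.Str.isIn "Land" (umoriTypeLine magic_cards c)))).map
      (umoriTypeLine magic_cards)
  umoriPossibleTypes.any (fun t => type_lines.all (fun tl => PySem.Str.isIn t tl))

-- ===== PRECONDITION & SPEC =====
def Spec_check_umori_py (card_list : List String) (magic_cards : List (String × List (String × String))) (out : Bool) : Prop := out = check_umori_py_alt card_list magic_cards
instance (card_list : List String) (magic_cards : List (String × List (String × String))) (out : Bool) : Decidable (Spec_check_umori_py card_list magic_cards out) := by unfold Spec_check_umori_py; infer_instance

-- ===== CLAIM =====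
def Claim_equal_check_umori_py : Prop := ∀ (card_list : List String) (magic_cards : List (String × List (String × String))), Dom_check_umori_py card_list magic_cards → Spec_check_umori_py card_list magic_cards (check_umori_py card_list magic_cards)

-- ===== LEMMAS AND PROOFS =====
-- A's shrinking loop returns true iff some type of the (nonempty) candidate list occurs
-- in every remaining card's type_line.
theorem umoriLoop_eq_any (magic_cards : List (String × List (String × String)))
    (cards : List String) :
    ∀ shared : List String, shared ≠ [] →
      umoriLoop magic_cards cards shared
        = shared.any (fun t => cards.all (fun c => PySem.Str.isIn t (umoriTypeLine magic_cards c))) := by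
  induction cards with
  | nil =>
    intro shared h
    simp [umoriLoop, List.any_eq_true]
    exact List.exists_mem_of_ne_nil shared h
  | cons c rest ih =>
    intro shared h
    simp only [umoriLoop]
    by_cases hf : shared.filter (fun t => PySem.Str.isIn t (umoriTypeLine magic_cards c)) = []
    · rw [if_pos hf]
      rw [List.filter_eq_nil_iff] at hf
      symm
      simp only [List.any_eq_false, List.all_cons, Bool.and_eq_true]
      intro t ht hc
      exact absurd hc.1 (by simpa using hf t ht)
    · rw [if_neg hf, ih _ hf, List.any_filter]
      simp [List.all_cons]

theorem check_umori_py_spec : Claim_equal_check_umori_py := by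
  intro card_list magic_cards _
  unfold Spec_check_umori_py check_umori_py check_umori_py_alt
  rw [umoriLoop_eq_any _ _ umoriPossibleTypes (by simp [umoriPossibleTypes])]
  simp [List.all_map]
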